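-- pv_equiv track=rewrite | github.com/ask501/Noble_Shelf | ui/dialogs/viewer/__init__.py | _thumb_strip_priority_order
-- ===== SOURCE A (Python) =====
-- def _thumb_strip_priority_order(center: int, n: int) -> list[int]:
--     if n <= 0:
--         return []
--     order: list[int] = [center]
--     for d in range(1, n + 1):
--         for sign in (-1, 1):
--             j = center + sign * d
--             if 0 <= j < n:
--                 order.append(j)
--     return order
-- ===== SOURCE B (Python) =====
-- def _thumb_strip_priority_order(center: int, n: int) -> list[int]:
--     if n <= 0:
--         return []
--     lo = max(0, center - n)
--     hi = min(n, center + n + 1)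
--     rest = sorted((j for j in range(lo, hi) if j != center),
--                   key=lambda j: 2 * abs(center - j) + (1 if j > center else 0))
--     return [center] + rest
-- ===== Notes on version B (the rewrite author's own statement) =====
-- stated objective: alternative
-- what changed: Replaces A's outward-expansion double loop (distance 1..n, sign -1/+1, conditional append) by materializing the reachable index window [max(0,center-n), min(n, center+n+1)) once and sorting it by the key 2*abs(center-j) + (1 if j > center else 0), i.e. distance from center with the left index before the right on ties, then prepending center.
import Mathlib
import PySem

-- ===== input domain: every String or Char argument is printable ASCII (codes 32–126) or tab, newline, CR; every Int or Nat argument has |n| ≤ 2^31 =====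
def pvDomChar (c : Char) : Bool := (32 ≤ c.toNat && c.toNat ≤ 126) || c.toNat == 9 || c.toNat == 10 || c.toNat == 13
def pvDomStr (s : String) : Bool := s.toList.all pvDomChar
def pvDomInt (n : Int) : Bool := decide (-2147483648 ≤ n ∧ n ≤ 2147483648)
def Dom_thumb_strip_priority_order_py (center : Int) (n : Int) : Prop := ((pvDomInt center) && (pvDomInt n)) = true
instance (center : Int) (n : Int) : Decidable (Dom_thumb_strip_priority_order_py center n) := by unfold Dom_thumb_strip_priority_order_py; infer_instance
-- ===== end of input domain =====

-- B replaces A's outward expansion loop by materializing the reachable indices and sorting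
-- them by (distance from center, left-before-right); same values, alternative algorithm.

-- ===== PORT A =====
def thumb_strip_priority_order_py (center : Int) (n : Int) : List Int :=
  if n ≤ 0 then []
  else
    (PySem.List.pyRange 1 (n + 1)).foldl (fun order d =>
      [(-1 : Int), 1].foldl (fun order sign =>
        if 0 ≤ center + sign * d ∧ center + sign * d < n
        then order ++ [center + sign * d] else order) order) [center]

-- ===== PORT B =====
def thumb_strip_priority_order_py_alt (center : Int) (n : Int) : List Int :=
  if n ≤ 0 then []
  else
    let lo := max 0 (center - n)
    let hi := min n (center + n + 1)
    let rest := PySem.List.sorted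
      ((PySem.List.pyRange lo hi).filter (fun j => j != center))
      (fun j => 2 * |center - j| + (if center < j then 1 else 0))
    center :: rest

-- ===== PRECONDITION & SPEC =====
def Spec_thumb_strip_priority_order_py (center : Int) (n : Int) (out : List Int) : Prop := out = thumb_strip_priority_order_py_alt center n
instance (center : Int) (n : Int) (out : List Int) : Decidable (Spec_thumb_strip_priority_order_py center n out) := by unfold Spec_thumb_strip_priority_order_py; infer_instance

-- ===== CLAIM (what is proved, stated in full; the proofs are below) =====
def Claim_equal_thumb_strip_priority_order_py : Prop := ∀ (center : Int) (n : Int), Dom_thumb_strip_priority_order_py center n → Spec_thumb_strip_priority_order_py center n (thumb_strip_priority_order_py center n)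

-- ===== LEMMAS AND PROOFS =====

-- the block of indices appended by A at distance d (left index first, then right)
def pvBlock (c n d : Int) : List Int :=
  (if 0 ≤ c + -1 * d ∧ c + -1 * d < n then [c + -1 * d] else []) ++
  (if 0 ≤ c + 1 * d ∧ c + 1 * d < n then [c + 1 * d] else [])

-- B's sort key
def pvKey (c j : Int) : Int := 2 * |c - j| + (if c < j then 1 else 0)

lemma pvKey_left (c d : Int) (hd : 1 ≤ d) : pvKey c (c - d) = 2 * d := by
  unfold pvKey
  rw [show c - (c - d) = d by ring, abs_of_nonneg (by omega), if_neg (by omega)]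
  ring

lemma pvKey_right (c d : Int) (hd : 1 ≤ d) : pvKey c (c + d) = 2 * d + 1 := by
  unfold pvKey
  rw [show c - (c + d) = -d by ring, abs_of_nonpos (by omega), if_pos (by omega)]
  ring

lemma mem_pvBlock {c n d x : Int} :
    x ∈ pvBlock c n d ↔ (x = c - d ∨ x = c + d) ∧ 0 ≤ x ∧ x < n := by
  unfold pvBlock
  split_ifs <;> simp <;> omega

lemma pvKey_of_mem_pvBlock {c n d x : Int} (hd : 1 ≤ d) (hx : x ∈ pvBlock c n d) :
    pvKey c x = 2 * d ∨ pvKey c x = 2 * d + 1 := by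
  rcases (mem_pvBlock.mp hx).1 with h | h
  · left; rw [h, pvKey_left c d hd]
  · right; rw [h, pvKey_right c d hd]

lemma pairwise_pvBlock {c n d : Int} (hd : 1 ≤ d) :
    (pvBlock c n d).Pairwise (fun a b => pvKey c a < pvKey c b) := by
  unfold pvBlock
  split_ifs <;> simp
  rw [show c + -d = c - d by ring, pvKey_left c d hd, pvKey_right c d hd]; omega

lemma pairwise_tail (c n : Int) :
    ((PySem.List.pyRange 1 (n + 1)).flatMap (pvBlock c n)).Pairwise
      (fun a b => pvKey c a < pvKey c b) := by
  rw [List.pairwise_flatMap]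
  constructor
  · intro d hd
    exact pairwise_pvBlock (PySem.List.mem_pyRange_one.mp hd).1
  · refine (PySem.List.pairwise_lt_pyRange_one 1 (n + 1)).imp_of_mem ?_
    intro d₁ d₂ h1 h2 hlt x hx y hy
    have hd1 : 1 ≤ d₁ := (PySem.List.mem_pyRange_one.mp h1).1
    have hd2 : 1 ≤ d₂ := (PySem.List.mem_pyRange_one.mp h2).1
    rcases pvKey_of_mem_pvBlock hd1 hx with h | h <;>
      rcases pvKey_of_mem_pvBlock hd2 hy with h' | h' <;> omega

lemma nodup_tail (c n : Int) :
    ((PySem.List.pyRange 1 (n + 1)).flatMap (pvBlock c n)).Nodup := by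
  refine (pairwise_tail c n).imp ?_
  intro a b hlt heq
  exact absurd (heq ▸ hlt) (lt_irrefl _)

lemma perm_tail (c n : Int) :
    ((PySem.List.pyRange 1 (n + 1)).flatMap (pvBlock c n)).Perm
      ((PySem.List.pyRange (max 0 (c - n)) (min n (c + n + 1))).filter (fun j => j != c)) := by
  refine (List.perm_ext_iff_of_nodup (nodup_tail c n)
    ((PySem.List.nodup_pyRange_one _ _).filter _)).mpr ?_
  intro x
  simp only [List.mem_flatMap, mem_pvBlock, PySem.List.mem_pyRange_one, List.mem_filter,
    bne_iff_ne, ne_eq]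
  constructor
  · rintro ⟨d, ⟨hd1, hd2⟩, hx⟩
    omega
  · rintro ⟨⟨hlo, hhi⟩, hne⟩
    refine ⟨if x < c then c - x else x - c, ?_⟩
    split_ifs <;> omega

lemma portA_eq (c n : Int) (h : 0 < n) :
    thumb_strip_priority_order_py c n =
      c :: (PySem.List.pyRange 1 (n + 1)).flatMap (pvBlock c n) := by
  unfold thumb_strip_priority_order_py
  rw [if_neg (by omega)]
  have hstep : ∀ (acc : List Int) (d : Int), d ∈ PySem.List.pyRange 1 (n + 1) →
      ([(-1 : Int), 1].foldl (fun order sign =>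
        if 0 ≤ c + sign * d ∧ c + sign * d < n
        then order ++ [c + sign * d] else order) acc) = acc ++ pvBlock c n d := by
    intro acc d _
    simp only [List.foldl, pvBlock]
    split_ifs <;> simp
  rw [PySem.List.foldl_congr_mem _ _ (fun acc d => acc ++ pvBlock c n d) _ hstep,
      PySem.List.foldl_append_eq_flatMap]
  rfl

-- ===== VERDICT (by name: the statement is the Claim_ definition above) =====
theorem thumb_strip_priority_order_py_spec : Claim_equal_thumb_strip_priority_order_py := by
  intro c n _
  unfold Spec_thumb_strip_priority_order_py thumb_strip_priority_order_py_alt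
  by_cases h : n ≤ 0
  · rw [if_pos h]
    unfold thumb_strip_priority_order_py
    rw [if_pos h]
  · rw [if_neg h, portA_eq c n (by omega)]
    refine congrArg (c :: ·) ?_
    exact (PySem.List.sorted_eq_of_perm_of_pairwise_lt _ _ _ (perm_tail c n)
      (pairwise_tail c n)).symm
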